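-- pv_equiv track=rewrite | github.com/cyhzzz/viral-content-factory | dist/openclaw/toolkit/image_gen.py | _elements_to_html
-- ===== SOURCE A (Python) =====
-- def _elements_to_html(elements: list[tuple[str, str]], is_last: bool) -> str:
--     """Convert parsed elements to HTML body fragment."""
--     html_parts = []
--     i = 0
--     while i < len(elements):
--         elem_type, content = elements[i]
--         if elem_type == "empty":
--             pass  # spacing handled by margins
--         elif elem_type == "h1":
--             html_parts.append(f"<h2>{content}</h2>")
--         elif elem_type == "h2":
--             html_parts.append(f"<h2>{content}</h2>")
--         elif elem_type == "h3":
--             html_parts.append(f"<h2 style='font-size:36px'>{content}</h2>")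
--         elif elem_type == "p":
--             html_parts.append(f"<p>{content}</p>")
--         elif elem_type == "gold":
--             html_parts.append(f"<p class='highlight'>{content}</p>")
--         elif elem_type == "blockquote":
--             html_parts.append(f"<blockquote><p>{content}</p></blockquote>")
--         elif elem_type == "list":
--             html_parts.append(f"<ul><li>{content}</li></ul>")
--         elif elem_type == "divider":
--             html_parts.append("<div class='divider'></div>")
--         i += 1
--
--     body = "".join(html_parts)
--     if is_last:
--         body += "<p style='text-align:right;font-size:16px;color:#ACACB0;margin-top:40px;'>∎</p>"
--     return body
-- ===== SOURCE B (Python) =====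
-- _WRAP = {
--     "h1": ("<h2>", "</h2>"),
--     "h2": ("<h2>", "</h2>"),
--     "h3": ("<h2 style='font-size:36px'>", "</h2>"),
--     "p": ("<p>", "</p>"),
--     "gold": ("<p class='highlight'>", "</p>"),
--     "blockquote": ("<blockquote><p>", "</p></blockquote>"),
--     "list": ("<ul><li>", "</li></ul>"),
-- }
-- _VOID = {"divider": "<div class='divider'></div>"}
-- _FOOTER = "<p style='text-align:right;font-size:16px;color:#ACACB0;margin-top:40px;'>∎</p>"
--
--
-- def _elements_to_html(elements: list[tuple[str, str]], is_last: bool) -> str: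
--     # Back-to-front build: start from the footer (or ""), walk the elements in
--     # reverse and prepend each rendered fragment — content-bearing tags are
--     # wrapped between their (open, close) pair, void tags contribute a fixed
--     # fragment, unknown and "empty" tags nothing.
--     html = _FOOTER if is_last else ""
--     for elem_type, content in reversed(elements):
--         if elem_type in _WRAP:
--             opening, closing = _WRAP[elem_type]
--             html = opening + content + closing + html
--         else:
--             html = _VOID.get(elem_type, "") + html
--     return html
-- ===== Notes on version B (the rewrite author's own statement) =====
-- stated objective: alternative
-- what changed: Replaces the forward while loop that appends per-tag f-string fragments to a list, joins them and appends the footer afterwards by a back-to-front pass: the accumulator starts as the footer (or ""), the elements are walked in reverse, and each fragment, rendered from an (open,close) wrap pair or a void-tag table instead of an elif ladder, is prepended to the string.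
import Mathlib
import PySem

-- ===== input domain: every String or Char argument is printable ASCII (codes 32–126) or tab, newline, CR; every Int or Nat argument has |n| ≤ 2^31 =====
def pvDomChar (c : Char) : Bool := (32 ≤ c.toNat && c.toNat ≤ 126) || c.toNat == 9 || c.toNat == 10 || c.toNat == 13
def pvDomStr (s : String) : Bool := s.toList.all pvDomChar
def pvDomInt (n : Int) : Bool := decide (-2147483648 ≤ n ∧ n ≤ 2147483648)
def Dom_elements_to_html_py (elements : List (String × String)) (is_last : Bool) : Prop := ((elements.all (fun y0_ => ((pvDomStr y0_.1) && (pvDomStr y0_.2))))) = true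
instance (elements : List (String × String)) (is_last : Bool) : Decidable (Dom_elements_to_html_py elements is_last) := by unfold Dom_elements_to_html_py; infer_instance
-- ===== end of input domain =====

-- B replaces A's forward while loop (list of f-string fragments, joined, footer appended
-- after) by a back-to-front pass: the accumulator starts as the footer (or ""), the elements
-- are walked reversed and each fragment, rendered from an (open, close) wrap pair or a
-- void-tag table instead of an elif ladder, is prepended (alternative decomposition; same cost).

-- the ∎ footer appended when is_last
def pvFooter : String := "<p style='text-align:right;font-size:16px;color:#ACACB0;margin-top:40px;'>∎</p>"

-- ===== PORT A =====
-- the while loop of A: walks the elements in order, appending to html_parts (branches in A's order)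
def elementsToHtmlGoA : List (String × String) → List String → List String
  | [], html_parts => html_parts
  | (elem_type, content) :: rest, html_parts =>
    elementsToHtmlGoA rest
      (html_parts ++
       (if elem_type == "empty" then []
        else if elem_type == "h1" then ["<h2>" ++ content ++ "</h2>"]
        else if elem_type == "h2" then ["<h2>" ++ content ++ "</h2>"]
        else if elem_type == "h3" then ["<h2 style='font-size:36px'>" ++ content ++ "</h2>"]
        else if elem_type == "p" then ["<p>" ++ content ++ "</p>"]
        else if elem_type == "gold" then ["<p class='highlight'>" ++ content ++ "</p>"]
        else if elem_type == "blockquote" then ["<blockquote><p>" ++ content ++ "</p></blockquote>"]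
        else if elem_type == "list" then ["<ul><li>" ++ content ++ "</li></ul>"]
        else if elem_type == "divider" then ["<div class='divider'></div>"]
        else []))

def elements_to_html_py (elements : List (String × String)) (is_last : Bool) : String :=
  let body := PySem.Str.join "" (elementsToHtmlGoA elements [])
  if is_last then body ++ pvFooter else body

-- ===== PORT B =====
-- Source B's _WRAP dict of (open, close) pairs and _VOID dict (insertion order)
def pvWrap : PySem.Dict String (String × String) :=
  PySem.Dict.ofList
  [("h1", ("<h2>", "</h2>")),
   ("h2", ("<h2>", "</h2>")),
   ("h3", ("<h2 style='font-size:36px'>", "</h2>")),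
   ("p", ("<p>", "</p>")),
   ("gold", ("<p class='highlight'>", "</p>")),
   ("blockquote", ("<blockquote><p>", "</p></blockquote>")),
   ("list", ("<ul><li>", "</li></ul>"))]

def pvVoid : PySem.Dict String String :=
  PySem.Dict.ofList [("divider", "<div class='divider'></div>")]

-- Source B's loop: start from the footer (or ""), walk the elements reversed, prepend each fragment
def elements_to_html_py_alt (elements : List (String × String)) (is_last : Bool) : String :=
  elements.reverse.foldl
    (fun html p =>
      match PySem.Dict.get? pvWrap p.1 with
      | some (opening, closing) => opening ++ p.2 ++ closing ++ html
      | none => PySem.Dict.getD pvVoid p.1 "" ++ html)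
    (if is_last then pvFooter else "")

-- ===== PRECONDITION & SPEC =====
def Spec_elements_to_html_py (elements : List (String × String)) (is_last : Bool) (out : String) : Prop := out = elements_to_html_py_alt elements is_last
instance (elements : List (String × String)) (is_last : Bool) (out : String) : Decidable (Spec_elements_to_html_py elements is_last out) := by unfold Spec_elements_to_html_py; infer_instance

-- ===== CLAIM =====
def Claim_equal_elements_to_html_py : Prop := ∀ (elements : List (String × String)) (is_last : Bool), Dom_elements_to_html_py elements is_last → Spec_elements_to_html_py elements is_last (elements_to_html_py elements is_last)

-- ===== LEMMAS AND PROOFS =====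
set_option maxHeartbeats 1000000

theorem pvWrap_items : pvWrap.items =
  [("h1", ("<h2>", "</h2>")),
   ("h2", ("<h2>", "</h2>")),
   ("h3", ("<h2 style='font-size:36px'>", "</h2>")),
   ("p", ("<p>", "</p>")),
   ("gold", ("<p class='highlight'>", "</p>")),
   ("blockquote", ("<blockquote><p>", "</p></blockquote>")),
   ("list", ("<ul><li>", "</li></ul>"))] := by decide

theorem pvVoid_items : pvVoid.items = [("divider", "<div class='divider'></div>")] := by decide

theorem str_ext {a b : String} (h : a.toList = b.toList) : a = b := by
  have := congrArg String.ofList h; simpa using this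

-- joining with "" concatenates
theorem join_empty_cons (x : String) (xs : List String) :
    PySem.Str.join "" (x :: xs) = x ++ PySem.Str.join "" xs := by
  cases xs with
  | nil =>
    apply str_ext
    simp [PySem.Str.toList_join, PySem.Chars.join_singleton, PySem.Chars.join_nil]
  | cons y ys =>
    apply str_ext
    simp [PySem.Str.toList_join, PySem.Chars.join_cons_cons]

-- B's per-element fragment, as a function (the head string of goB's cons case)
def pvElemStr (p : String × String) : String :=
  match PySem.Dict.get? pvWrap p.1 with
  | some (o, c) => o ++ p.2 ++ c
  | none => PySem.Dict.getD pvVoid p.1 ""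

-- per element: A's branch, joined, is exactly B's fragment
theorem branch_eq (elem_type c : String) :
    PySem.Str.join ""
      (if elem_type == "empty" then ([] : List String)
       else if elem_type == "h1" then ["<h2>" ++ c ++ "</h2>"]
       else if elem_type == "h2" then ["<h2>" ++ c ++ "</h2>"]
       else if elem_type == "h3" then ["<h2 style='font-size:36px'>" ++ c ++ "</h2>"]
       else if elem_type == "p" then ["<p>" ++ c ++ "</p>"]
       else if elem_type == "gold" then ["<p class='highlight'>" ++ c ++ "</p>"]
       else if elem_type == "blockquote" then ["<blockquote><p>" ++ c ++ "</p></blockquote>"]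
       else if elem_type == "list" then ["<ul><li>" ++ c ++ "</li></ul>"]
       else if elem_type == "divider" then ["<div class='divider'></div>"]
       else []) = pvElemStr (elem_type, c) := by
  have hnil : PySem.Str.join "" ([] : List String) = "" := by decide
  have hone : ∀ s : String, PySem.Str.join "" [s] = s := by
    intro s
    apply str_ext
    simp [PySem.Str.toList_join, PySem.Chars.join_singleton]
  by_cases h0 : elem_type = "empty"
  · subst h0; simp [pvElemStr, PySem.Dict.get?, PySem.Dict.getD, pvWrap_items, pvVoid_items, hnil]
  · by_cases h1 : elem_type = "h1"
    · subst h1; simp [pvElemStr, PySem.Dict.get?, pvWrap_items, hone]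
    · by_cases h2 : elem_type = "h2"
      · subst h2; simp [pvElemStr, PySem.Dict.get?, pvWrap_items, hone]
      · by_cases h3 : elem_type = "h3"
        · subst h3; simp [pvElemStr, PySem.Dict.get?, pvWrap_items, hone]
        · by_cases h4 : elem_type = "p"
          · subst h4; simp [pvElemStr, PySem.Dict.get?, pvWrap_items, hone]
          · by_cases h5 : elem_type = "gold"
            · subst h5; simp [pvElemStr, PySem.Dict.get?, pvWrap_items, hone]
            · by_cases h6 : elem_type = "blockquote"
              · subst h6; simp [pvElemStr, PySem.Dict.get?, pvWrap_items, hone]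
              · by_cases h7 : elem_type = "list"
                · subst h7; simp [pvElemStr, PySem.Dict.get?, pvWrap_items, hone]
                · by_cases h8 : elem_type = "divider"
                  · subst h8
                    simp [pvElemStr, PySem.Dict.get?, PySem.Dict.getD, pvWrap_items, pvVoid_items, hone]
                  · have hwrap : PySem.Dict.get? pvWrap elem_type = none := by
                      simp [PySem.Dict.get?, pvWrap_items]
                      exact ⟨Ne.symm h1, Ne.symm h2, Ne.symm h3, Ne.symm h4,
                             Ne.symm h5, Ne.symm h6, Ne.symm h7⟩
                    have hvoid : PySem.Dict.getD pvVoid elem_type "" = "" := by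
                      simp [PySem.Dict.getD, PySem.Dict.get?, pvVoid_items, Ne.symm h8]
                    simp [pvElemStr, hwrap, hvoid, h0, h1, h2, h3, h4, h5, h6, h7, h8, hnil]

-- A's loop accumulates; its joined body is the fold of B's fragments
theorem goA_join (l : List (String × String)) :
    ∀ parts, PySem.Str.join "" (elementsToHtmlGoA l parts) =
      PySem.Str.join "" parts ++ (l.map pvElemStr).foldr (· ++ ·) "" := by
  induction l with
  | nil =>
    intro parts
    simp [elementsToHtmlGoA]
  | cons hd tl ih =>
    intro parts
    obtain ⟨elem_type, content⟩ := hd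
    rw [elementsToHtmlGoA, ih]
    have hsplit : ∀ (xs ys : List String),
        PySem.Str.join "" (xs ++ ys) = PySem.Str.join "" xs ++ PySem.Str.join "" ys := by
      intro xs ys
      induction xs with
      | nil => simp; apply str_ext; simp
      | cons x xs ihx =>
        rw [List.cons_append, join_empty_cons, join_empty_cons, ihx]
        apply str_ext; simp
    rw [hsplit, branch_eq]
    apply str_ext; simp

-- B's reversed fold equals the fold of fragments followed by the footer
theorem goB_eq (is_last : Bool) (l : List (String × String)) :
    elements_to_html_py_alt l is_last =
      (l.map pvElemStr).foldr (· ++ ·) "" ++ (if is_last then pvFooter else "") := by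
  unfold elements_to_html_py_alt
  rw [List.foldl_reverse]
  induction l with
  | nil =>
    cases is_last <;> (apply str_ext; simp)
  | cons hd tl ih =>
    obtain ⟨elem_type, content⟩ := hd
    rw [List.foldr_cons, ih]
    cases hw : PySem.Dict.get? pvWrap elem_type with
    | some oc =>
      obtain ⟨o, c⟩ := oc
      simp only [List.map_cons, List.foldr_cons, pvElemStr, hw]
      apply str_ext; simp
    | none =>
      simp only [List.map_cons, List.foldr_cons, pvElemStr, hw]
      apply str_ext; simp

-- ===== VERDICT =====
theorem elements_to_html_py_spec : Claim_equal_elements_to_html_py := by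
  intro elements is_last _
  unfold Spec_elements_to_html_py elements_to_html_py
  rw [goB_eq, goA_join]
  have hjn : PySem.Str.join "" ([] : List String) = "" := by decide
  cases is_last <;> simp [hjn]
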